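-- pv_equiv track=rewrite | github.com/aifhauih/sentence-level-RAG | tools/permutation_generator.py | simple_shuffling
-- ===== SOURCE A (Python) =====
-- def simple_shuffling(l: list):
--     shuffle_result = []
--     l.reverse()
--
--     dida = True
--     for i in l:
--         if(dida):
--             shuffle_result.append(i)
--         else:
--             shuffle_result = [i] + shuffle_result
--         dida = not(dida)
--     return shuffle_result
-- ===== SOURCE B (Python) =====
-- def simple_shuffling(l: list):
--     l.reverse()  # keep A's in-place mutation of the argument
--     return l[1::2][::-1] + l[0::2]
-- ===== Notes on version B (the rewrite author's own statement) =====
-- stated objective: simpler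
-- what changed: Replaces the alternating append/prepend toggle loop with two parity slices of the reversed list: reversed odd-index elements concatenated before even-index elements.
import Mathlib
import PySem

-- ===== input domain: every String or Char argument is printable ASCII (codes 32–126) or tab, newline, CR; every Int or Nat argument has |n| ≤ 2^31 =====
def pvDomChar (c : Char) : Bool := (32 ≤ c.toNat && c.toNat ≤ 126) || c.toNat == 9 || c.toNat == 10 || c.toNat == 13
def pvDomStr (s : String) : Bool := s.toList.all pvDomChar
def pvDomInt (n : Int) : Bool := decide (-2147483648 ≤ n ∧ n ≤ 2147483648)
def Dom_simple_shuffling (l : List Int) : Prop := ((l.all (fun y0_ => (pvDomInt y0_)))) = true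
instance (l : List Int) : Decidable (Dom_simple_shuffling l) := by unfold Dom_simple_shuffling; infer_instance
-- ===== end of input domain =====

-- B replaces A's alternating append/prepend toggle loop with two parity slices of the
-- reversed list (same return value; both A and B reverse the argument in place in Python —
-- the equivalence proved here is about the return value).

-- ===== PORT A =====
-- l.reverse(); toggle loop: dida=True appends, dida=False prepends
def simple_shuffling (l : List Int) : List Int :=
  (l.reverse.foldl
    (fun (st : List Int × Bool) i =>
      if st.2 then (st.1 ++ [i], !st.2) else (i :: st.1, !st.2))
    ([], true)).1

-- ===== PORT B =====
-- hand port of the extended slice r[k::2] for k = 0 / 1 (exact: step 2, nonnegative start)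
def pvEvens (r : List Int) : List Int :=
  match r with
  | [] => []
  | [a] => [a]
  | a :: _ :: t => a :: pvEvens t

def pvOdds (r : List Int) : List Int :=
  match r with
  | [] => []
  | [_] => []
  | _ :: b :: t => b :: pvOdds t

def simple_shuffling_alt (l : List Int) : List Int :=
  let r := l.reverse
  (pvOdds r).reverse ++ pvEvens r

-- ===== PRECONDITION & SPEC =====
def Spec_simple_shuffling (l : List Int) (out : List Int) : Prop := out = simple_shuffling_alt l
instance (l : List Int) (out : List Int) : Decidable (Spec_simple_shuffling l out) := by unfold Spec_simple_shuffling; infer_instance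

-- ===== CLAIM (what is proved, stated in full; the proofs are below) =====
def Claim_equal_simple_shuffling : Prop := ∀ (l : List Int), Dom_simple_shuffling l → Spec_simple_shuffling l (simple_shuffling l)

-- ===== LEMMAS AND PROOFS =====

-- ===== VERDICT (by name: the statement is the Claim_ definition above) =====
-- closed form of A's toggle loop from an arbitrary accumulator
theorem pvLoop_closed (xs acc : List Int) :
    (xs.foldl
      (fun (st : List Int × Bool) i =>
        if st.2 then (st.1 ++ [i], !st.2) else (i :: st.1, !st.2))
      (acc, true)).1 = (pvOdds xs).reverse ++ acc ++ pvEvens xs := by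
  induction xs using pvEvens.induct generalizing acc with
  | case1 => simp [pvOdds, pvEvens]
  | case2 a => simp [pvOdds, pvEvens]
  | case3 a b t ih =>
      simp only [List.foldl, if_true, Bool.not_true, pvOdds, pvEvens]
      rw [if_neg (by simp)]
      simp only [Bool.not_false]
      rw [ih (b :: (acc ++ [a]))]
      simp

theorem simple_shuffling_spec : Claim_equal_simple_shuffling := by
  intro l _
  show simple_shuffling l = simple_shuffling_alt l
  unfold simple_shuffling simple_shuffling_alt
  rw [pvLoop_closed]
  simp
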